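-- pv_equiv track=rewrite | github.com/jdjfisher/op-cg | translator/util.py | extractDelimStr
-- ===== SOURCE A (Python) =====
-- def extractDelimStr(text, delims, start=None):
--   # Unpack
--   left, right = delims
--
--   i = start = text.find(left, start) + 1
--   depth = 1
--
--   # Scan the text until the same depth delimeter is found
--   while depth:
--     if text[i] == left:
--       depth += 1
--     elif text[i] == right:
--       depth -= 1
--     i += 1
--   else:
--     end = i - 1
--
--   return text[start:end]
-- ===== SOURCE B (Python) =====
-- def extractDelimStr(text, delims, start=None):
--   # Unpack
--   left, right = delims
--
--   # find(right) only locates the next closing delimiter if it is one character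
--   if len(right) != 1:
--     raise ValueError('right delimiter must be a single character')
--
--   i = start = text.find(left, start) + 1
--   depth = 1
--
--   # Jump between closing delimiters with str.find; add the opening
--   # delimiters seen in each gap to the depth in one batch
--   while True:
--     end = text.find(right, i)
--     if end == -1:
--       raise ValueError('unbalanced delimiters')
--     depth += sum(c == left for c in text[i:end]) - 1
--     if depth == 0:
--       return text[start:end]
--     i = end + 1
-- ===== Notes on version B (the rewrite author's own statement) =====
-- stated objective: alternative
-- what changed: A scans one character at a time with an if/elif cascade updating the nesting depth; B jumps directly between closing-delimiter occurrences with str.find and adds the opening delimiters of each gap to the depth in one batch, raising ValueError instead of A's IndexError when the closing delimiter is never reached.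
import Mathlib
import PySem

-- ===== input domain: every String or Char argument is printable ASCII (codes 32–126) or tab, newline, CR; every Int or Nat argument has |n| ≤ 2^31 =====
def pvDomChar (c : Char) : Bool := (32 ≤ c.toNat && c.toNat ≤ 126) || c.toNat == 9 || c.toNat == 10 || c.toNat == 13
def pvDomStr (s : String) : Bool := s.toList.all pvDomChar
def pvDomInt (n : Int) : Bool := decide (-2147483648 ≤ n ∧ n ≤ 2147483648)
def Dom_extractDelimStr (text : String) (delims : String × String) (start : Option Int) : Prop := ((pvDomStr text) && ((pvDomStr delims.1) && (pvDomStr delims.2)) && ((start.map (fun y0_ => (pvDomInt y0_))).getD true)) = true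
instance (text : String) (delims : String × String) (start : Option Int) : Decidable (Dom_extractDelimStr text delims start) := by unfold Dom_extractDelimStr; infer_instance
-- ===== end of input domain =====

-- B replaces A's per-character if/elif depth scan by jumping between closing-delimiter
-- occurrences with str.find and adding the openings of each gap to the depth in one batch.

-- ===== PORT A =====
-- text.find(sub, start) where start may be None (both Pythons share this first line)
def pvFind (cs sub : List Char) (start : Option Int) : Int :=
  match start with
  | none => PySem.Chars.find cs sub
  | some s => PySem.Chars.findFrom cs sub s none

-- A's `while depth:` loop returning the final `i`; fuel (cs.length + 1 at the call site)
-- only makes the recursion structural — it never runs out before the loop exits or Python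
-- raises IndexError (text[i] out of range, which Pre_ excludes; the port returns i there).
def pvALoop (cs L R : List Char) : Nat → Nat → Nat → Nat
  | 0, i, _ => i
  | fuel+1, i, depth =>
    if depth = 0 then i
    else
      match cs[i]? with
      | none => i  -- Python: IndexError (outside Pre_)
      | some c =>
        pvALoop cs L R fuel (i+1)
          (if [c] = L then depth + 1 else if [c] = R then depth - 1 else depth)

def extractDelimStr (text : String) (delims : String × String) (start : Option Int) : String :=
  let cs := text.toList
  let L := delims.1.toList
  let R := delims.2.toList
  let st : Nat := (pvFind cs L start + 1).toNat   -- i = start = text.find(left, start) + 1 (find ≥ -1, so ≥ 0)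
  let i := pvALoop cs L R (cs.length + 1) st 1
  let e := i - 1                                   -- end = i - 1
  String.ofList (PySem.List.slice cs (some (st : Int)) (some (e : Int)))  -- text[start:end]

-- ===== PORT B =====
-- B's `while True:` loop over closing-delimiter occurrences; fuel (cs.length + 2 at the
-- call site) only makes the recursion structural — i strictly increases, so it never runs
-- out.  Where Python B raises ValueError (end == -1, excluded by Pre_) the port returns [].
-- sum(c == left for c in text[i:end]) is ported as countP over the slice.
def pvBLoop (cs L R : List Char) (st : Nat) : Nat → Nat → Nat → List Char
  | 0, _, _ => []
  | fuel+1, i, depth =>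
    let e := PySem.Chars.findFrom cs R (i : Int) none
    if e = -1 then []  -- Python: raise ValueError (outside Pre_)
    else
      let depth' := depth + (PySem.List.slice cs (some (i : Int)) (some e)).countP (fun c => [c] = L) - 1
      if depth' = 0 then PySem.List.slice cs (some (st : Int)) (some e)  -- text[start:end]
      else pvBLoop cs L R st fuel (e.toNat + 1) depth'

def extractDelimStr_alt (text : String) (delims : String × String) (start : Option Int) : String :=
  let cs := text.toList
  let L := delims.1.toList
  let R := delims.2.toList
  if R.length ≠ 1 then ""  -- Python: raise ValueError (outside Pre_)
  else
    let st : Nat := (pvFind cs L start + 1).toNat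
    String.ofList (pvBLoop cs L R st (cs.length + 2) st 1)

-- ===== PRECONDITION & SPEC =====
-- Pre_ is exactly the set of inputs on which A returns normally: the right delimiter is a
-- single character rc, the left delimiter is not the same string (otherwise the depth can
-- never decrease), and scanning from start the count of rc chars first exceeds the count
-- of chars equal to the left delimiter (the ∃-count condition: the nesting depth reaches
-- 0 before the end of the text); on every other input A raises IndexError.
def Pre_extractDelimStr (text : String) (delims : String × String) (start : Option Int) : Prop :=
  match delims.2.toList with
  | [rc] =>
      delims.1.toList ≠ [rc] ∧
      (∃ n < (text.toList.drop ((pvFind text.toList delims.1.toList start + 1).toNat)).length,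
        ((text.toList.drop ((pvFind text.toList delims.1.toList start + 1).toNat)).take (n+1)).count rc
          = ((text.toList.drop ((pvFind text.toList delims.1.toList start + 1).toNat)).take (n+1)).countP
              (fun c => [c] = delims.1.toList) + 1)
  | _ => False

instance (text : String) (delims : String × String) (start : Option Int) : Decidable (Pre_extractDelimStr text delims start) := by
  unfold Pre_extractDelimStr
  rcases delims with ⟨L, R⟩
  rcases R.toList with _ | ⟨rc, _ | _⟩ <;> infer_instance

def pvWitness_extractDelimStr : String × (String × String) × Option Int := ("(a(b)c)", ("(", ")"), none)

def Spec_extractDelimStr (text : String) (delims : String × String) (start : Option Int) (out : String) : Prop := out = extractDelimStr_alt text delims start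
instance (text : String) (delims : String × String) (start : Option Int) (out : String) : Decidable (Spec_extractDelimStr text delims start out) := by unfold Spec_extractDelimStr; infer_instance

-- ===== CLAIM (what is proved, stated in full; the proofs are below) =====
def Claim_equal_extractDelimStr : Prop := ∀ (text : String) (delims : String × String) (start : Option Int), Dom_extractDelimStr text delims start → Pre_extractDelimStr text delims start → Spec_extractDelimStr text delims start (extractDelimStr text delims start)

-- ===== LEMMAS AND PROOFS =====

-- Reference scan: absolute index of the char where the nesting depth first drops to 0,
-- scanning the suffix cs.drop i (absolute start index i); none = the scan runs off the end.
-- The branch structure is exactly A's loop body.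
def pvScan (L R : List Char) : List Char → Nat → Nat → Option Nat
  | [], _, _ => none
  | c :: rest, i, depth =>
    if [c] = L then pvScan L R rest (i+1) (depth+1)
    else if [c] = R then
      if depth = 1 then some i else pvScan L R rest (i+1) (depth - 1)
    else pvScan L R rest (i+1) depth

theorem pv_singleton_prefix (c : Char) (xs : List Char) : [c] <+: xs ↔ xs.head? = some c := by
  cases xs with
  | nil => simp
  | cons a t =>
    rw [List.cons_prefix_cons]
    simp [eq_comm]

theorem pv_prefix_drop (c : Char) (cs : List Char) (k : Nat) :
    [c] <+: cs.drop k ↔ cs[k]? = some c := by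
  rw [pv_singleton_prefix, List.head?_drop]

-- Pre_'s count condition fails on every prefix if the scan runs off the end.
theorem pvScan_none_count (L : List Char) (rc : Char) (hne : L ≠ [rc]) :
    ∀ (suf : List Char) (i d : Nat), 1 ≤ d → pvScan L [rc] suf i d = none →
    ∀ n < suf.length, (suf.take (n+1)).count rc ≠ (suf.take (n+1)).countP (fun c => [c] = L) + d := by
  intro suf
  induction suf with
  | nil => intro i d hd h n hn; simp at hn
  | cons c rest ih =>
    intro i d hd h n hn
    by_cases hcl : [c] = L
    · rw [pvScan, if_pos hcl] at h
      have hcrc : c ≠ rc := by intro e; rw [e] at hcl; exact hne hcl.symm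
      cases n with
      | zero =>
        have e1 : (List.take (0+1) (c :: rest)).count rc = 0 := by
          simp [hcrc]
        have e2 : (List.take (0+1) (c :: rest)).countP (fun x => [x] = L) = 1 := by
          simp [decide_eq_true hcl]
        rw [e1, e2]
        omega
      | succ m =>
        have := ih (i+1) (d+1) (by omega) h m (by simpa using hn)
        simp only [List.take_succ_cons, List.count_cons, List.countP_cons] at this ⊢
        simp [hcrc, hcl] at this ⊢
        omega
    · by_cases hcr : [c] = [rc]
      · have hcrc : c = rc := by simpa using hcr
        subst hcrc
        rw [pvScan, if_neg hcl, if_pos rfl] at h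
        by_cases hd1 : d = 1
        · rw [if_pos hd1] at h; exact absurd h (by simp)
        · rw [if_neg hd1] at h
          cases n with
          | zero =>
            simp [hcl]
            omega
          | succ m =>
            have := ih (i+1) (d-1) (by omega) h m (by simpa using hn)
            simp only [List.take_succ_cons, List.count_cons, List.countP_cons] at this ⊢
            simp [hcl] at this ⊢
            omega
      · have hcrc : c ≠ rc := by simpa using hcr
        rw [pvScan, if_neg hcl, if_neg hcr] at h
        cases n with
        | zero =>
          simp [hcl, hcrc]
          omega
        | succ m =>
          have := ih (i+1) d hd h m (by simpa using hn)
          simp only [List.take_succ_cons, List.count_cons, List.countP_cons] at this ⊢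
          simp [hcl, hcrc] at this ⊢
          omega

theorem pvScan_some_mem (L : List Char) (rc : Char) :
    ∀ (suf : List Char) (i d j : Nat), pvScan L [rc] suf i d = some j → rc ∈ suf := by
  intro suf
  induction suf with
  | nil => intro i d j h; simp [pvScan] at h
  | cons c rest ih =>
    intro i d j h
    rw [pvScan] at h
    split_ifs at h with h1 h2 h3
    · exact List.mem_cons_of_mem _ (ih _ _ _ h)
    · have : c = rc := by simpa using h2
      subst this; exact List.mem_cons_self
    · exact List.mem_cons_of_mem _ (ih _ _ _ h)
    · exact List.mem_cons_of_mem _ (ih _ _ _ h)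

theorem pvScan_some_lt (L : List Char) (rc : Char) (cs : List Char) (i d j : Nat)
    (hs : pvScan L [rc] (cs.drop i) i d = some j) : i < cs.length := by
  by_contra hh
  rw [List.drop_eq_nil_iff.mpr (Nat.le_of_not_lt hh)] at hs
  simp [pvScan] at hs

-- Scanning a right-delimiter-free stretch only adds the openings of that stretch to the depth.
theorem pvScan_batch (cs : List Char) (L : List Char) (rc : Char) :
    ∀ (n i d : Nat), i + n ≤ cs.length →
    (∀ k, i ≤ k → k < i + n → cs[k]? ≠ some rc) →
    pvScan L [rc] (cs.drop i) i d
      = pvScan L [rc] (cs.drop (i+n)) (i+n) (d + ((cs.drop i).take n).countP (fun c => [c] = L)) := by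
  intro n
  induction n with
  | zero => intro i d _ _; simp
  | succ m ih =>
    intro i d hlen hno
    have hi : i < cs.length := by omega
    have hni := hno i le_rfl (by omega)
    rw [List.getElem?_eq_getElem hi] at hni
    have h2 : ¬([cs[i]] = [rc]) := by
      simp only [List.cons.injEq, and_true]
      intro e; exact hni (by rw [e])
    rw [List.drop_eq_getElem_cons hi, pvScan, List.take_succ_cons, List.countP_cons]
    by_cases h1 : [cs[i]] = L
    · rw [if_pos h1]
      have := ih (i+1) (d+1) (by omega) (fun k hk1 hk2 => hno k (by omega) (by omega))
      rw [(by omega : i + 1 + m = i + (m+1))] at this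
      rw [this]
      simp [h1]
      ring_nf
    · rw [if_neg h1, if_neg h2]
      have := ih (i+1) d (by omega) (fun k hk1 hk2 => hno k (by omega) (by omega))
      rw [(by omega : i + 1 + m = i + (m+1))] at this
      rw [this]
      simp [h1]

theorem pvALoop_zero_depth (cs L R : List Char) (fuel i : Nat) (hf : 1 ≤ fuel) :
    pvALoop cs L R fuel i 0 = i := by
  cases fuel with
  | zero => omega
  | succ f => rw [pvALoop, if_pos rfl]

-- A's loop stops one past the index the reference scan names.
theorem pvALoop_eq (cs : List Char) (L : List Char) (rc : Char) :
    ∀ (fuel i depth j : Nat), depth ≠ 0 →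
    pvScan L [rc] (cs.drop i) i depth = some j →
    cs.length + 1 ≤ fuel + i →
    pvALoop cs L [rc] fuel i depth = j + 1 := by
  intro fuel
  induction fuel with
  | zero =>
    intro i depth j _ hs hf
    have := pvScan_some_lt L rc cs i depth j hs
    omega
  | succ fuel ih =>
    intro i depth j hd hs hf
    have hi : i < cs.length := pvScan_some_lt L rc cs i depth j hs
    rw [List.drop_eq_getElem_cons hi, pvScan] at hs
    rw [pvALoop, if_neg hd, List.getElem?_eq_getElem hi]
    show pvALoop cs L [rc] fuel (i+1)
        (if [cs[i]] = L then depth + 1 else if [cs[i]] = [rc] then depth - 1 else depth) = j + 1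
    by_cases h1 : [cs[i]] = L
    · rw [if_pos h1] at hs
      rw [if_pos h1]
      exact ih (i+1) (depth+1) j (by omega) hs (by omega)
    · rw [if_neg h1] at hs
      rw [if_neg h1]
      by_cases h2 : [cs[i]] = [rc]
      · rw [if_pos h2] at hs
        rw [if_pos h2]
        by_cases hd1 : depth = 1
        · rw [if_pos hd1] at hs
          injection hs with hj
          rw [hd1]
          rw [(by omega : (1 : Nat) - 1 = 0), pvALoop_zero_depth cs L [rc] fuel (i+1) (by omega), hj]
        · rw [if_neg hd1] at hs
          exact ih (i+1) (depth-1) j (by omega) hs (by omega)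
      · rw [if_neg h2] at hs
        rw [if_neg h2]
        exact ih (i+1) depth j hd hs (by omega)

-- B's loop returns the slice ending at the index the reference scan names.
theorem pvBLoop_eq (cs : List Char) (L : List Char) (rc : Char) (hne : L ≠ [rc]) (st : Nat) :
    ∀ (fuel i depth j : Nat), 1 ≤ depth →
    pvScan L [rc] (cs.drop i) i depth = some j →
    cs.length + 1 ≤ fuel + i →
    pvBLoop cs L [rc] st fuel i depth
      = PySem.List.slice cs (some (st : Int)) (some (j : Int)) := by
  intro fuel
  induction fuel with
  | zero =>
    intro i depth j _ hs hf
    have := pvScan_some_lt L rc cs i depth j hs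
    omega
  | succ fuel ih =>
    intro i depth j hd hs hf
    have hi : i < cs.length := pvScan_some_lt L rc cs i depth j hs
    have hile : i ≤ cs.length := le_of_lt hi
    have hrmem : rc ∈ cs.drop i := pvScan_some_mem L rc _ i depth j hs
    have hrne : PySem.Chars.findFrom cs [rc] (i : Int) none ≠ -1 := by
      intro hEq
      exact (PySem.Chars.findFrom_natCast_eq_neg_one_iff cs [rc] i hile).mp hEq
        ((List.singleton_infix_iff rc _).mpr hrmem)
    obtain ⟨hr1, hr2, hr3⟩ := PySem.Chars.findFrom_natCast_spec cs [rc] i hile hrne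
    set e := PySem.Chars.findFrom cs [rc] (i : Int) none with hedef
    have he0 : (0 : Int) ≤ e := le_trans (by exact_mod_cast Int.natCast_nonneg i) hr1
    have heget : cs[e.toNat]? = some rc := (pv_prefix_drop rc cs e.toNat).mp hr2
    obtain ⟨helt, heval⟩ := List.getElem?_eq_some_iff.mp heget
    have hie : i ≤ e.toNat := by omega
    have hbatch := pvScan_batch cs L rc (e.toNat - i) i depth (by omega)
      (by
        intro k hk1 hk2 hkc
        exact hr3 k hk1 (by omega) ((pv_prefix_drop rc cs k).mpr hkc))
    rw [(by omega : i + (e.toNat - i) = e.toNat)] at hbatch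
    -- the batch of openings between i and e is exactly B's countP over the slice
    have hslice : PySem.List.slice cs (some (i : Int)) (some e)
        = (cs.drop i).take (e.toNat - i) := by
      rw [← Int.toNat_of_nonneg he0, PySem.List.slice_natCast]
      simp
      omega
    set opens := ((cs.drop i).take (e.toNat - i)).countP (fun c => [c] = L) with hopens
    rw [hbatch, List.drop_eq_getElem_cons helt, pvScan] at hs
    by_cases hL : [cs[e.toNat]] = L
    · -- impossible: cs[e.toNat] = rc, so this would mean L = [rc]
      rw [heval] at hL
      exact absurd hL.symm hne
    · rw [if_neg hL, if_pos (by rw [heval])] at hs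
      rw [pvBLoop]
      simp only [← hedef]
      rw [if_neg hrne, hslice, ← hopens]
      by_cases hd1 : depth + opens = 1
      · rw [if_pos hd1] at hs
        injection hs with hj
        rw [if_pos (by omega : depth + opens - 1 = 0)]
        have : ((j : Nat) : Int) = e := by rw [← hj]; exact Int.toNat_of_nonneg he0
        rw [this]
      · rw [if_neg hd1] at hs
        have hrec := ih (e.toNat + 1) (depth + opens - 1) j (by omega) hs (by omega)
        rw [if_neg (by omega : ¬(depth + opens - 1 = 0))]
        exact hrec

-- ===== VERDICT (by name: the statement is the Claim_ definition above) =====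
theorem extractDelimStr_spec : Claim_equal_extractDelimStr := by
  intro text delims start _ hpre
  unfold Spec_extractDelimStr extractDelimStr extractDelimStr_alt
  unfold Pre_extractDelimStr at hpre
  rcases hR : delims.2.toList with _ | ⟨rc, _ | _⟩ <;>
    simp only [hR] at hpre <;> try exact hpre.elim
  obtain ⟨hne, n, hn, hcnt⟩ := hpre
  set cs := text.toList with hcs
  set L := delims.1.toList with hLd
  set st : Nat := (pvFind cs L start + 1).toNat with hst
  cases hsc : pvScan L [rc] (cs.drop st) st 1 with
  | none => exact absurd hcnt (pvScan_none_count L rc (fun hh => hne hh) _ st 1 le_rfl hsc n hn)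
  | some j =>
    have hA := pvALoop_eq cs L rc (cs.length + 1) st 1 j (by omega) hsc (by omega)
    have hB := pvBLoop_eq cs L rc hne st (cs.length + 2) st 1 j le_rfl hsc (by omega)
    show String.ofList
        (PySem.List.slice cs (some ((st : Nat) : Int))
          (some ((pvALoop cs L [rc] (cs.length + 1) st 1 - 1 : Nat) : Int))) =
      (if ([rc] : List Char).length ≠ 1 then ""
       else String.ofList (pvBLoop cs L [rc] st (cs.length + 2) st 1))
    rw [if_neg (by simp), hA, hB, Nat.add_sub_cancel]
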